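-- pv_equiv track=rewrite | github.com/sangeethasanthiralingam/learnstyle-ai | ml_models/emotion_ai/emotion_fusion_engine.py | _are_emotions_opposite
-- ===== SOURCE A (Python) =====
-- def _are_emotions_opposite(emotion1: str, emotion2: str) -> bool:
--     """Check if two emotions are opposite"""
--     opposite_pairs = [
--         ('happy', 'sad'),
--         ('excited', 'bored'),
--         ('confident', 'anxious'),
--         ('focused', 'confused')
--     ]
--
--     for pair in opposite_pairs:
--         if (emotion1 in pair and emotion2 in pair) and emotion1 != emotion2:
--             return True
--     return False
-- ===== SOURCE B (Python) =====
-- # B canonicalizes the unordered pair by lexicographic ordering and does one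
-- # membership test against the set of canonically-ordered opposite pairs.
-- _CANON_OPPOSITES = {
--     ('anxious', 'confident'),
--     ('bored', 'excited'),
--     ('confused', 'focused'),
--     ('happy', 'sad'),
-- }
--
-- def _are_emotions_opposite(emotion1: str, emotion2: str) -> bool:
--     lo, hi = (emotion1, emotion2) if emotion1 <= emotion2 else (emotion2, emotion1)
--     return (lo, hi) in _CANON_OPPOSITES
-- ===== Notes on version B (the rewrite author's own statement) =====
-- stated objective: alternative
-- what changed: Instead of scanning pair tuples with per-element membership tests, B canonicalizes the unordered pair by lexicographically ordering the two emotions and does a single set-membership test against the canonically-ordered opposite pairs.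
import Mathlib
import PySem

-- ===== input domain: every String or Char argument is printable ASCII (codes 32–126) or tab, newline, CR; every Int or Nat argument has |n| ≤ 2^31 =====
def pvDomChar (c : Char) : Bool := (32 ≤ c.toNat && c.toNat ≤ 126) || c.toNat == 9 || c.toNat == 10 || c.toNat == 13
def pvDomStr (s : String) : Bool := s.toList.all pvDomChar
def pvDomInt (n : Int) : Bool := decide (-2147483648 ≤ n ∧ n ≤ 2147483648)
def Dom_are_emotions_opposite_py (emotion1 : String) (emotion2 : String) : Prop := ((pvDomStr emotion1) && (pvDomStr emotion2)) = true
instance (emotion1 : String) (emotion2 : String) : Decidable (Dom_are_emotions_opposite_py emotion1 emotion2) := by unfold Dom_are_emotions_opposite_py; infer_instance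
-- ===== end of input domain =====

-- B canonicalizes the unordered pair by lexicographic ordering and does one set-membership
-- test against the canonically-ordered opposite pairs (objective: alternative algorithm).

-- ===== PORT A =====
-- the literal list of opposite pairs from A
def pvPairsA : List (String × String) :=
  [("happy", "sad"), ("excited", "bored"), ("confident", "anxious"), ("focused", "confused")]

-- the 'for pair in opposite_pairs: if … return True' loop, with early return
def pvLoopA (pairs : List (String × String)) (e1 e2 : String) : Bool :=
  match pairs with
  | [] => false
  | (a, b) :: rest =>
    if ((e1 = a ∨ e1 = b) ∧ (e2 = a ∨ e2 = b)) ∧ e1 ≠ e2 then true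
    else pvLoopA rest e1 e2

def are_emotions_opposite_py (emotion1 : String) (emotion2 : String) : Bool :=
  pvLoopA pvPairsA emotion1 emotion2

-- ===== PORT B =====
-- the set of canonically (lexicographically) ordered opposite pairs from Source B
def pvCanonOpposites : PySem.Set (String × String) :=
  PySem.Set.ofList
    [("anxious", "confident"), ("bored", "excited"), ("confused", "focused"), ("happy", "sad")]

def are_emotions_opposite_py_alt (emotion1 : String) (emotion2 : String) : Bool :=
  let p := if emotion1 ≤ emotion2 then (emotion1, emotion2) else (emotion2, emotion1)
  pvCanonOpposites.contains p

-- ===== PRECONDITION & SPEC =====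
def Spec_are_emotions_opposite_py (emotion1 : String) (emotion2 : String) (out : Bool) : Prop := out = are_emotions_opposite_py_alt emotion1 emotion2
instance (emotion1 : String) (emotion2 : String) (out : Bool) : Decidable (Spec_are_emotions_opposite_py emotion1 emotion2 out) := by unfold Spec_are_emotions_opposite_py; infer_instance

-- ===== CLAIM (what is proved, stated in full; the proofs are below) =====
def Claim_equal_are_emotions_opposite_py : Prop := ∀ (emotion1 : String) (emotion2 : String), Dom_are_emotions_opposite_py emotion1 emotion2 → Spec_are_emotions_opposite_py emotion1 emotion2 (are_emotions_opposite_py emotion1 emotion2)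

-- ===== LEMMAS AND PROOFS =====
set_option maxHeartbeats 1000000 in
theorem pv_key (e1 e2 : String) :
    are_emotions_opposite_py e1 e2 = are_emotions_opposite_py_alt e1 e2 := by
  simp only [are_emotions_opposite_py, are_emotions_opposite_py_alt, pvPairsA, pvCanonOpposites]
  by_cases h1 : e1 = "happy"
  · subst h1
    by_cases k : e2 = "sad" <;> by_cases k2 : e2 = "happy" <;>
      simp_all [pvLoopA, PySem.Set.ofList, PySem.Set.contains, Prod.ext_iff] <;>
      split_ifs <;> simp_all <;> decide
  by_cases h2 : e1 = "sad"
  · subst h2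
    by_cases k : e2 = "happy" <;> by_cases k2 : e2 = "sad" <;>
      simp_all [pvLoopA, PySem.Set.ofList, PySem.Set.contains, Prod.ext_iff] <;>
      split_ifs <;> simp_all <;> decide
  by_cases h3 : e1 = "excited"
  · subst h3
    by_cases k : e2 = "bored" <;> by_cases k2 : e2 = "excited" <;>
      simp_all [pvLoopA, PySem.Set.ofList, PySem.Set.contains, Prod.ext_iff] <;>
      split_ifs <;> simp_all <;> decide
  by_cases h4 : e1 = "bored"
  · subst h4
    by_cases k : e2 = "excited" <;> by_cases k2 : e2 = "bored" <;>
      simp_all [pvLoopA, PySem.Set.ofList, PySem.Set.contains, Prod.ext_iff] <;>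
      split_ifs <;> simp_all <;> decide
  by_cases h5 : e1 = "confident"
  · subst h5
    by_cases k : e2 = "anxious" <;> by_cases k2 : e2 = "confident" <;>
      simp_all [pvLoopA, PySem.Set.ofList, PySem.Set.contains, Prod.ext_iff] <;>
      split_ifs <;> simp_all <;> decide
  by_cases h6 : e1 = "anxious"
  · subst h6
    by_cases k : e2 = "confident" <;> by_cases k2 : e2 = "anxious" <;>
      simp_all [pvLoopA, PySem.Set.ofList, PySem.Set.contains, Prod.ext_iff] <;>
      split_ifs <;> simp_all <;> decide
  by_cases h7 : e1 = "focused"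
  · subst h7
    by_cases k : e2 = "confused" <;> by_cases k2 : e2 = "focused" <;>
      simp_all [pvLoopA, PySem.Set.ofList, PySem.Set.contains, Prod.ext_iff] <;>
      split_ifs <;> simp_all <;> decide
  by_cases h8 : e1 = "confused"
  · subst h8
    by_cases k : e2 = "focused" <;> by_cases k2 : e2 = "confused" <;>
      simp_all [pvLoopA, PySem.Set.ofList, PySem.Set.contains, Prod.ext_iff] <;>
      split_ifs <;> simp_all <;> decide
  · -- e1 none of the eight: A's loop is false and no canonical pair can contain e1
    simp_all [pvLoopA, PySem.Set.ofList, PySem.Set.contains, Prod.ext_iff]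
    split_ifs <;> simp_all

-- ===== VERDICT (by name: the statement is the Claim_ definition above) =====
theorem are_emotions_opposite_py_spec : Claim_equal_are_emotions_opposite_py := by
  intro e1 e2 _
  exact pv_key e1 e2
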